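-- pv_equiv track=rewrite | github.com/AllenShieh/DatabaseSystems | P2B/cleantext.py | parsed2uni
-- ===== SOURCE A (Python) =====
-- def parsed2uni(parsed_text):
--     unigrams = ""
--
--     parsed_text+=' '
--     wordlist = []
--     i = 0
--     word = ""
--     while(i<len(parsed_text)):
--         if(parsed_text[i].isdigit() or parsed_text[i].isalpha() or (parsed_text[i] in {'\'', '-', '—', '$', '%'})):
--             word+=parsed_text[i]
--         elif(parsed_text[i] in {'.', '!', '?', ',', ';', ':'}):
--             if((parsed_text[i-1].isalpha() or parsed_text[i-1].isdigit()) and (parsed_text[i+1].isalpha() or parsed_text[i+1].isdigit())):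
--                 word+=parsed_text[i]
--         else:
--             if(len(word)>0):
--                 wordlist.append(word)
--                 word = ""
--         i+=1
--
--     for j in range(len(wordlist)):
--         if(unigrams!=""):
--             unigrams+=' '
--         unigrams+=wordlist[j]
--
--     return unigrams
-- ===== SOURCE B (Python) =====
-- def parsed2uni(parsed_text):
--     # transform-then-split: emit chars/spaces into one buffer, then let split() find the words
--     t = parsed_text + ' '
--     out = []
--     for i in range(len(t)):
--         c = t[i]
--         if c.isdigit() or c.isalpha() or c in {'\'', '-', '—', '$', '%'}:
--             out.append(c)
--         elif c in {'.', '!', '?', ',', ';', ':'}: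
--             if t[i-1].isalnum() and t[i+1].isalnum():
--                 out.append(c)
--         else:
--             out.append(' ')
--     return ' '.join(''.join(out).split())
-- ===== Notes on version B (the rewrite author's own statement) =====
-- stated objective: simpler
-- what changed: Replaces A's explicit word buffer + wordlist + manual separator-aware join loop with a single transform pass that emits kept characters or spaces into one buffer and then returns ' '.join(buffer.split()).
import Mathlib
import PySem

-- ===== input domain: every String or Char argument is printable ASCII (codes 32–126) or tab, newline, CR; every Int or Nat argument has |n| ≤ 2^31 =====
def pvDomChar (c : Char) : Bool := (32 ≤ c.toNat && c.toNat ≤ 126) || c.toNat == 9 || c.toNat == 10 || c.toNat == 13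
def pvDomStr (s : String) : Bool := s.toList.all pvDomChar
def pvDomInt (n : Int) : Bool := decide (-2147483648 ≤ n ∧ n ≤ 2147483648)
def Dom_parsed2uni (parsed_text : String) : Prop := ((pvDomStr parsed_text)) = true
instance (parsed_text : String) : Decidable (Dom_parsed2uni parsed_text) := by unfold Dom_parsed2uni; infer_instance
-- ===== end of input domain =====

-- B replaces A's word-buffer/wordlist/flush machinery and manual join loop by a single
-- transform pass followed by split-and-rejoin (objective: simpler decomposition).

-- ===== PORT A =====
-- A's inner-punctuation test reads parsed_text[i-1] / parsed_text[i+1]; the `.getD ' '`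
-- default for i+1 is never consulted (the last character is the appended ' ', which never
-- reaches that branch), and i-1 at i=0 is Python's -1 wraparound, which pyGet? reproduces.
def pvAWordChar (c : Char) : Bool :=
  PySem.Chars.isdigit c || PySem.Chars.isalpha c || decide (c ∈ ['\'', '-', '—', '$', '%'])

def pvAPunct (c : Char) : Bool := decide (c ∈ ['.', '!', '?', ',', ';', ':'])

def pvANbrOk (t : List Char) (i : Nat) : Bool :=
  let prev := (PySem.List.pyGet? t ((i : Int) - 1)).getD ' '
  let next := (PySem.List.pyGet? t ((i : Int) + 1)).getD ' '
  (PySem.Chars.isalpha prev || PySem.Chars.isdigit prev) &&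
    (PySem.Chars.isalpha next || PySem.Chars.isdigit next)

def pvALoop (t : List Char) (i : Nat) (wordlist : List (List Char)) (word : List Char) :
    List (List Char) × List Char :=
  if h : i < t.length then
    let c := t[i]
    if pvAWordChar c then pvALoop t (i+1) wordlist (word ++ [c])
    else if pvAPunct c then
      if pvANbrOk t i then pvALoop t (i+1) wordlist (word ++ [c])
      else pvALoop t (i+1) wordlist word
    else
      if word.length > 0 then pvALoop t (i+1) (wordlist ++ [word]) []
      else pvALoop t (i+1) wordlist word
  else (wordlist, word)
termination_by t.length - i

def parsed2uni (parsed_text : String) : String :=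
  let t := parsed_text.toList ++ [' ']
  let st := pvALoop t 0 [] []
  String.mk ((List.range st.1.length).foldl
    (fun u j => (if u ≠ [] then u ++ [' '] else u) ++ (st.1[j]?.getD [])) [])

-- ===== PORT B =====
def pvBEmit (t : List Char) (i : Nat) (c : Char) : List Char :=
  if PySem.Chars.isdigit c || PySem.Chars.isalpha c || decide (c ∈ ['\'', '-', '—', '$', '%']) then
    [c]
  else if decide (c ∈ ['.', '!', '?', ',', ';', ':']) then
    if PySem.Chars.isalnum ((PySem.List.pyGet? t ((i : Int) - 1)).getD ' ')
        && PySem.Chars.isalnum ((PySem.List.pyGet? t ((i : Int) + 1)).getD ' ') then [c]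
    else []
  else [' ']

def pvBLoop (t : List Char) (i : Nat) (out : List Char) : List Char :=
  if h : i < t.length then pvBLoop t (i+1) (out ++ pvBEmit t i t[i]) else out
termination_by t.length - i

def parsed2uni_alt (parsed_text : String) : String :=
  let t := parsed_text.toList ++ [' ']
  let out := pvBLoop t 0 []
  String.mk (PySem.Chars.join [' '] (PySem.Chars.split₀ out))

-- ===== PRECONDITION & SPEC =====
def Spec_parsed2uni (parsed_text : String) (out : String) : Prop := out = parsed2uni_alt parsed_text
instance (parsed_text : String) (out : String) : Decidable (Spec_parsed2uni parsed_text out) := by unfold Spec_parsed2uni; infer_instance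

-- ===== CLAIM (what is proved, stated in full; the proofs are below) =====
def Claim_equal_parsed2uni : Prop := ∀ (parsed_text : String), Dom_parsed2uni parsed_text → Spec_parsed2uni parsed_text (parsed2uni parsed_text)

-- ===== LEMMAS AND PROOFS =====

theorem pvBLoop_acc (t : List Char) : ∀ i out, pvBLoop t i out = out ++ pvBLoop t i [] := by
  have aux : ∀ fuel i out, t.length - i ≤ fuel → pvBLoop t i out = out ++ pvBLoop t i [] := by
    intro fuel
    induction fuel with
    | zero =>
      intro i out h
      have hi : ¬ i < t.length := by omega
      rw [pvBLoop, pvBLoop]; simp [hi]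
    | succ n ih =>
      intro i out h
      by_cases hi : i < t.length
      · rw [pvBLoop, pvBLoop]
        simp only [hi, dif_pos]
        rw [ih (i+1) (out ++ pvBEmit t i t[i]) (by omega),
            ih (i+1) ([] ++ pvBEmit t i t[i]) (by omega)]
        simp
      · rw [pvBLoop, pvBLoop]; simp [hi]
  intro i out; exact aux (t.length - i) i out le_rfl

theorem pvWordChar_not_space (c : Char) (h : pvAWordChar c = true) :
    PySem.Chars.isspace c = false := by
  simp only [pvAWordChar, Bool.or_eq_true, decide_eq_true_eq, List.mem_cons,
    List.not_mem_nil, or_false] at h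
  have e0 : '0'.val.toNat = 48 := by decide
  have e9 : '9'.val.toNat = 57 := by decide
  have eA : 'A'.val.toNat = 65 := by decide
  have eZ : 'Z'.val.toNat = 90 := by decide
  have ea : 'a'.val.toNat = 97 := by decide
  have ez : 'z'.val.toNat = 122 := by decide
  rcases h with (h | h) | (h | h | h | h | h)
  · simp only [PySem.Chars.isdigit, Bool.and_eq_true, decide_eq_true_eq, Char.le_def] at h
    simp only [PySem.Chars.isspace, Char.toNat]
    obtain ⟨h1, h2⟩ := h
    simp only [UInt32.le_iff_toNat_le, e0, e9] at h1 h2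
    simp only [Bool.or_eq_false_iff, Bool.and_eq_false_iff, decide_eq_false_iff_not]
    omega
  · simp only [PySem.Chars.isalpha, PySem.Chars.isupper, PySem.Chars.islower,
      Bool.or_eq_true, Bool.and_eq_true, decide_eq_true_eq, Char.le_def] at h
    simp only [PySem.Chars.isspace, Char.toNat]
    simp only [Bool.or_eq_false_iff, Bool.and_eq_false_iff, decide_eq_false_iff_not]
    rcases h with ⟨h1, h2⟩ | ⟨h1, h2⟩ <;>
      simp only [UInt32.le_iff_toNat_le, eA, eZ, ea, ez] at h1 h2 <;> omega
  all_goals subst h; decide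

theorem pvPunct_not_space (c : Char) (h : pvAPunct c = true) :
    PySem.Chars.isspace c = false := by
  simp only [pvAPunct, decide_eq_true_eq, List.mem_cons, List.not_mem_nil, or_false] at h
  rcases h with h | h | h | h | h | h <;> subst h <;> decide

theorem pvGo_acc : ∀ (s cur : List Char) (acc : List (List Char)),
    PySem.Chars.split₀.go s cur acc = acc.reverse ++ PySem.Chars.split₀.go s cur [] := by
  intro s
  induction s with
  | nil =>
    intro cur acc
    rw [PySem.Chars.split₀.go, PySem.Chars.split₀.go]
    split_ifs <;> simp
  | cons c rest ih =>
    intro cur acc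
    rw [PySem.Chars.split₀.go]
    conv_rhs => rw [PySem.Chars.split₀.go]
    by_cases hs : PySem.Chars.isspace c = true
    · simp only [hs, if_pos]
      by_cases hc : cur.isEmpty
      · simp only [hc, if_pos]
        exact ih [] acc
      · simp only [hc, if_neg, Bool.not_eq_true]
        rw [ih [] (cur.reverse :: acc), ih [] (cur.reverse :: ([] : List (List Char)))]
        simp
    · simp only [hs, if_neg, Bool.not_eq_true]
      exact ih (c :: cur) acc

theorem pvGo_word : ∀ (w : List Char), (∀ c ∈ w, PySem.Chars.isspace c = false) →
    ∀ (s cur : List Char) (acc : List (List Char)),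
    PySem.Chars.split₀.go (w ++ s) cur acc = PySem.Chars.split₀.go s (w.reverse ++ cur) acc := by
  intro w
  induction w with
  | nil => intro _ s cur acc; simp
  | cons c w' ih =>
    intro hw s cur acc
    have hc : PySem.Chars.isspace c = false := hw c (by simp)
    rw [List.cons_append, PySem.Chars.split₀.go]
    simp only [hc, Bool.false_eq_true, if_false]
    rw [ih (fun d hd => hw d (by simp [hd])) s (c :: cur) acc]
    simp

theorem pvSplit₀_word (w : List Char) (hw : ∀ c ∈ w, PySem.Chars.isspace c = false) :
    PySem.Chars.split₀ w = if w = [] then [] else [w] := by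
  rw [PySem.Chars.split₀, show w = w ++ [] by simp, pvGo_word w hw [] [] []]
  rw [PySem.Chars.split₀.go]
  rcases w with _ | ⟨c, w'⟩
  · simp
  · simp [List.isEmpty_iff]

theorem pvSplit₀_word_space (w s : List Char) (hw : ∀ c ∈ w, PySem.Chars.isspace c = false) :
    PySem.Chars.split₀ (w ++ ' ' :: s) = (if w = [] then [] else [w]) ++ PySem.Chars.split₀ s := by
  rw [PySem.Chars.split₀, pvGo_word w hw (' ' :: s) [] [], PySem.Chars.split₀.go]
  have hsp : PySem.Chars.isspace ' ' = true := by decide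
  simp only [hsp, if_pos, List.append_nil]
  rcases w with _ | ⟨c, w'⟩
  · simp [PySem.Chars.split₀]
  · have he : ((c :: w').reverse).isEmpty = false := by simp
    simp only [he, Bool.false_eq_true, if_false, List.reverse_reverse]
    rw [pvGo_acc s [] [c :: w']]
    simp [PySem.Chars.split₀]

theorem pvGo_ne_nil : ∀ (s cur : List Char) (acc : List (List Char)),
    (∀ a ∈ acc, a ≠ []) → ∀ w ∈ PySem.Chars.split₀.go s cur acc, w ≠ [] := by
  intro s
  induction s with
  | nil =>
    intro cur acc hacc w hw
    rw [PySem.Chars.split₀.go] at hw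
    by_cases hc : cur.isEmpty
    · simp only [hc, if_pos, List.mem_reverse] at hw
      exact hacc w hw
    · simp only [hc, if_neg, Bool.not_eq_true, List.mem_reverse, List.mem_cons] at hw
      rcases hw with h | h
      · subst h
        have : cur ≠ [] := by simpa [List.isEmpty_iff] using hc
        simpa using this
      · exact hacc w h
  | cons c rest ih =>
    intro cur acc hacc w hw
    rw [PySem.Chars.split₀.go] at hw
    by_cases hs : PySem.Chars.isspace c = true
    · simp only [hs, if_pos] at hw
      by_cases hc : cur.isEmpty
      · simp only [hc, if_pos] at hw
        exact ih [] acc hacc w hw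
      · simp only [hc, if_neg, Bool.not_eq_true] at hw
        refine ih [] (cur.reverse :: acc) ?_ w hw
        intro a ha
        rcases List.mem_cons.mp ha with h | h
        · subst h; simp [List.isEmpty_iff] at hc; simpa using hc
        · exact hacc a h
    · simp only [hs, if_neg, Bool.not_eq_true] at hw
      exact ih (c :: cur) acc hacc w hw

theorem pvSplit₀_ne_nil (s : List Char) : ∀ w ∈ PySem.Chars.split₀ s, w ≠ [] := by
  intro w hw
  exact pvGo_ne_nil s [] [] (by simp) w hw

-- main invariant: A's flushed words plus pending word = split of B's emitted suffix
theorem pvMain (t : List Char) : ∀ (fuel i : Nat) (wl : List (List Char)) (w : List Char),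
    t.length - i ≤ fuel → (∀ c ∈ w, PySem.Chars.isspace c = false) →
    (pvALoop t i wl w).1 ++ (if (pvALoop t i wl w).2 = [] then [] else [(pvALoop t i wl w).2])
      = wl ++ PySem.Chars.split₀ (w ++ pvBLoop t i []) := by
  intro fuel
  induction fuel with
  | zero =>
    intro i wl w hf hw
    have hi : ¬ i < t.length := by omega
    rw [pvALoop, pvBLoop]
    simp only [hi, dif_neg, not_false_iff]
    rw [List.append_nil, pvSplit₀_word w hw]
  | succ n ih =>
    intro i wl w hf hw
    by_cases hi : i < t.length
    · rw [pvALoop, pvBLoop]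
      simp only [hi, dif_pos]
      rw [pvBLoop_acc t (i+1) ([] ++ pvBEmit t i t[i])]
      simp only [List.nil_append]
      by_cases h1 : pvAWordChar t[i] = true
      · have hb : pvBEmit t i t[i] = [t[i]] := by
          simp only [pvBEmit]
          rw [if_pos (by simpa [pvAWordChar] using h1)]
        have hw' : ∀ c ∈ w ++ [t[i]], PySem.Chars.isspace c = false := by
          intro d hd
          rcases List.mem_append.mp hd with h | h
          · exact hw d h
          · simp only [List.mem_singleton] at h; subst h
            exact pvWordChar_not_space _ h1
        simp only [h1, if_pos, hb]
        rw [ih (i+1) wl (w ++ [t[i]]) (by omega) hw']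
        simp
      · rw [if_neg h1]
        by_cases h2 : pvAPunct t[i] = true
        · rw [if_pos h2]
          by_cases h3 : pvANbrOk t i = true
          · have hb : pvBEmit t i t[i] = [t[i]] := by
              simp only [pvBEmit]
              rw [if_neg (by simpa [pvAWordChar] using h1),
                  if_pos (by simpa [pvAPunct] using h2),
                  if_pos (by simpa [pvANbrOk, PySem.Chars.isalnum] using h3)]
            have hw' : ∀ c ∈ w ++ [t[i]], PySem.Chars.isspace c = false := by
              intro d hd
              rcases List.mem_append.mp hd with h | h
              · exact hw d h
              · simp only [List.mem_singleton] at h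
                subst h
                exact pvPunct_not_space _ h2
            rw [if_pos h3, hb, ih (i+1) wl (w ++ [t[i]]) (by omega) hw']
            simp
          · have hb : pvBEmit t i t[i] = [] := by
              simp only [pvBEmit]
              rw [if_neg (by simpa [pvAWordChar] using h1),
                  if_pos (by simpa [pvAPunct] using h2),
                  if_neg (by simpa [pvANbrOk, PySem.Chars.isalnum] using h3)]
            rw [if_neg h3, hb, ih (i+1) wl w (by omega) hw]
            simp
        · have hb : pvBEmit t i t[i] = [' '] := by
            simp only [pvBEmit]
            rw [if_neg (by simpa [pvAWordChar] using h1),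
                if_neg (by simpa [pvAPunct] using h2)]
          rw [if_neg h2, hb]
          by_cases hw0 : w.length > 0
          · have hwne : w ≠ [] := by
              intro hcontr
              subst hcontr
              simp at hw0
            rw [if_pos hw0, ih (i+1) (wl ++ [w]) [] (by omega) (by simp)]
            simp only [List.nil_append, List.singleton_append]
            rw [pvSplit₀_word_space w _ hw, if_neg hwne]
            simp
          · have hwe : w = [] := List.length_eq_zero_iff.mp (by omega)
            subst hwe
            rw [if_neg hw0, ih (i+1) wl [] (by omega) (by simp)]
            simp only [List.nil_append, List.singleton_append]
            have hsp := pvSplit₀_word_space [] (pvBLoop t (i+1) []) (by simp)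
            simp only [List.nil_append] at hsp
            rw [hsp]
            simp
    · rw [pvALoop, pvBLoop]
      simp only [hi, dif_neg, not_false_iff]
      rw [List.append_nil, pvSplit₀_word w hw]

-- the trailing appended ' ' guarantees the pending word is empty when the loop ends
theorem pvALoop_word_nil (s : List Char) : ∀ (fuel i : Nat) (wl : List (List Char)) (w : List Char),
    (s ++ [' ']).length - i ≤ fuel → i ≤ s.length →
    (pvALoop (s ++ [' ']) i wl w).2 = [] := by
  intro fuel
  induction fuel with
  | zero =>
    intro i wl w hf hi
    exfalso
    have : (s ++ [' ']).length = s.length + 1 := by simp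
    omega
  | succ n ih =>
    intro i wl w hf hi
    have hlen : (s ++ [' ']).length = s.length + 1 := by simp
    have hilt : i < (s ++ [' ']).length := by omega
    rw [pvALoop]
    simp only [hilt, dif_pos]
    by_cases hone : i < s.length
    · split_ifs <;> exact ih (i+1) _ _ (by omega) (by omega)
    · have hieq : i = s.length := by omega
      have hc : (s ++ [' '])[i] = ' ' := by
        subst hieq
        simp
      simp only [hc]
      have hW : pvAWordChar ' ' = false := by decide
      have hP : pvAPunct ' ' = false := by decide
      simp only [hW, hP, Bool.false_eq_true, if_false]
      have hstop : ¬ (i + 1 < (s ++ [' ']).length) := by omega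
      by_cases hw0 : w.length > 0
      · rw [if_pos hw0, pvALoop, dif_neg hstop]
      · rw [if_neg hw0, pvALoop, dif_neg hstop]
        show w = []
        exact List.length_eq_zero_iff.mp (by omega)

theorem pvRangeFold {α β : Type} (d : α) (g : β → α → β) :
    ∀ (xs : List α) (a : β),
    (List.range xs.length).foldl (fun u j => g u (xs[j]?.getD d)) a = xs.foldl g a := by
  intro xs
  induction xs using List.reverseRecOn with
  | nil => intro a; simp
  | append_singleton ys y ih =>
    intro a
    have hlen : (ys ++ [y]).length = ys.length + 1 := by simp
    rw [hlen, List.range_succ, List.foldl_append]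
    have hco : (List.range ys.length).foldl (fun u j => g u ((ys ++ [y])[j]?.getD d)) a
        = (List.range ys.length).foldl (fun u j => g u (ys[j]?.getD d)) a := by
      apply List.foldl_ext
      intro b j hj
      rw [List.getElem?_append_left (List.mem_range.mp hj)]
    rw [hco, ih, List.foldl_append]
    simp

theorem pvFoldJoin : ∀ (wl : List (List Char)) (u : List Char), u ≠ [] →
    wl.foldl (fun u w => (if u ≠ [] then u ++ [' '] else u) ++ w) u
      = u ++ wl.flatMap (fun w => ' ' :: w) := by
  intro wl
  induction wl with
  | nil => intro u hu; simp
  | cons w wl ih =>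
    intro u hu
    simp only [List.foldl_cons, List.flatMap_cons]
    rw [if_pos hu, ih (u ++ [' '] ++ w) (by simp)]
    simp

theorem pvIntercalate : ∀ (wl : List (List Char)) (w : List Char),
    List.intercalate [' '] (w :: wl) = w ++ wl.flatMap (fun v => ' ' :: v) := by
  intro wl
  induction wl with
  | nil => intro w; simp [List.intercalate]
  | cons v vs ih =>
    intro w
    have hstep : List.intersperse [' '] (w :: v :: vs) = w :: [' '] :: List.intersperse [' '] (v :: vs) := rfl
    simp only [List.intercalate, hstep, List.flatten_cons]
    simp only [List.intercalate] at ih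
    rw [ih v]
    simp

theorem pvJoinA_eq_join (wl : List (List Char)) (h : ∀ w ∈ wl, w ≠ []) :
    wl.foldl (fun u w => (if u ≠ [] then u ++ [' '] else u) ++ w) []
      = PySem.Chars.join [' '] wl := by
  rcases wl with _ | ⟨w, wl⟩
  · simp [PySem.Chars.join, List.intercalate]
  · have hw : w ≠ [] := h w (by simp)
    simp only [List.foldl_cons]
    rw [if_neg (by simp : ¬ (([] : List Char) ≠ [])), pvFoldJoin wl ([] ++ w) (by simpa using hw)]
    simp only [List.nil_append]
    rw [PySem.Chars.join, pvIntercalate]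

-- ===== VERDICT (by name: the statement is the Claim_ definition above) =====
theorem parsed2uni_spec : Claim_equal_parsed2uni := by
  intro s _
  unfold Spec_parsed2uni parsed2uni parsed2uni_alt
  have hmain := pvMain (s.toList ++ [' ']) ((s.toList ++ [' ']).length) 0 [] []
    (by omega) (by simp)
  have hnil := pvALoop_word_nil s.toList ((s.toList ++ [' ']).length) 0 [] []
    (by omega) (by omega)
  rw [hnil] at hmain
  simp only [List.append_nil, List.nil_append, if_pos] at hmain
  have hfold := pvRangeFold ([] : List Char)
    (fun u w => (if u ≠ [] then u ++ [' '] else u) ++ w)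
    (pvALoop (s.toList ++ [' ']) 0 [] []).1 []
  beta_reduce at hfold
  show String.mk ((List.range (pvALoop (s.toList ++ [' ']) 0 [] []).1.length).foldl
      (fun u j => (if u ≠ [] then u ++ [' '] else u) ++ ((pvALoop (s.toList ++ [' ']) 0 [] []).1[j]?.getD [])) [])
    = String.mk (PySem.Chars.join [' '] (PySem.Chars.split₀ (pvBLoop (s.toList ++ [' ']) 0 [])))
  rw [hfold, hmain, pvJoinA_eq_join _ (pvSplit₀_ne_nil _)]
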